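-- pv_equiv track=rewrite | github.com/HenestrosaDev/sololearn | code-coaches/medium/how-far/how_far.py | get_blocks_between_house_and_pond
-- ===== SOURCE A (Python) =====
-- def get_blocks_between_house_and_pond(layout: str) -> int:
--     # Find the indices of the money, thief, and guards on the casino floor
--     house_index = layout.find("H")
--     pond_index = layout.find("P")
--     block_indices = [i for i, char in enumerate(layout) if char == "B"]
--
--     return sum(
--         min(house_index, pond_index) < block_index < max(house_index, pond_index)
--         for block_index in block_indices
--     )
-- ===== SOURCE B (Python) =====
-- def get_blocks_between_house_and_pond(layout: str) -> int:
--     lo = min(layout.find("H"), layout.find("P"))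
--     hi = max(layout.find("H"), layout.find("P"))
--     # slice strictly between the two markers; clamp so hi == -1 (neither found) gives an empty slice
--     return layout[lo + 1 : max(hi, 0)].count("B")
-- ===== Notes on version B (the rewrite author's own statement) =====
-- stated objective: simpler
-- what changed: Replaces the list of all block positions plus a filtering sum with one slice of the region strictly between the two find() results and a single count over it (upper bound clamped to 0 so the neither-marker case gives an empty slice).
import Mathlib
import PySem

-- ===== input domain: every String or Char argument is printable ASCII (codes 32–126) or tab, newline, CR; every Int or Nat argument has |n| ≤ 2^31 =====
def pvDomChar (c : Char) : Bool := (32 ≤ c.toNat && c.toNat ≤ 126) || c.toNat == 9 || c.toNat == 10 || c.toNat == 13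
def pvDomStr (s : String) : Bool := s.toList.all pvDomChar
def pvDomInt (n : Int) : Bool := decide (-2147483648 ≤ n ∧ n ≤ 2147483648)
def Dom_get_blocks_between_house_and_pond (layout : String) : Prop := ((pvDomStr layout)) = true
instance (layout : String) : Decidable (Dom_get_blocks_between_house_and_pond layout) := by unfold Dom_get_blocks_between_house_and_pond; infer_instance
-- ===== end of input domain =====

-- ===== PORT A =====
-- B = slice strictly between the two find() results, one count, instead of A's list of all B
-- positions plus a filtering sum (objective: simpler).
def get_blocks_between_house_and_pond (layout : String) : Int :=
  let house_index : Int := PySem.Str.find layout "H"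
  let pond_index : Int := PySem.Str.find layout "P"
  let block_indices : List Int :=
    (PySem.List.enumerate layout.toList 0).foldl
      (fun acc p => if p.2 == 'B' then acc ++ [p.1] else acc) []
  block_indices.foldl
    (fun acc block_index =>
      acc + (if min house_index pond_index < block_index ∧
                block_index < max house_index pond_index then (1 : Int) else 0)) 0

-- ===== PORT B =====
def get_blocks_between_house_and_pond_alt (layout : String) : Int :=
  let lo : Int := min (PySem.Str.find layout "H") (PySem.Str.find layout "P")
  let hi : Int := max (PySem.Str.find layout "H") (PySem.Str.find layout "P")
  ((PySem.Str.count (PySem.Str.slice layout (some (lo + 1)) (some (max hi 0))) "B" : Nat) : Int)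

-- ===== PRECONDITION & SPEC =====
def Spec_get_blocks_between_house_and_pond (layout : String) (out : Int) : Prop := out = get_blocks_between_house_and_pond_alt layout
instance (layout : String) (out : Int) : Decidable (Spec_get_blocks_between_house_and_pond layout out) := by unfold Spec_get_blocks_between_house_and_pond; infer_instance

-- ===== CLAIM (what is proved, stated in full; the proofs are below) =====
def Claim_equal_get_blocks_between_house_and_pond : Prop := ∀ (layout : String), Dom_get_blocks_between_house_and_pond layout → Spec_get_blocks_between_house_and_pond layout (get_blocks_between_house_and_pond layout)

-- ===== LEMMAS AND PROOFS =====

-- Chars.count's worker with a single-character needle counts that character.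
theorem pv_count_go_single (c : Char) : ∀ (fuel : Nat) (l : List Char) (acc : Nat),
    l.length ≤ fuel → PySem.Chars.count.go [c] fuel l acc = acc + l.count c := by
  intro fuel
  induction fuel with
  | zero =>
    intro l acc h
    cases l with
    | nil => simp [PySem.Chars.count.go]
    | cons x t => simp at h
  | succ n ih =>
    intro l acc h
    cases l with
    | nil => simp [PySem.Chars.count.go]
    | cons x t =>
      have ht : t.length ≤ n := by simp at h; omega
      simp only [PySem.Chars.count.go, List.isPrefixOf, Bool.and_true, List.count_cons]
      by_cases hcx : (c == x) = true
      · have hxc : (x == c) = true := by simp at hcx ⊢; exact hcx.symm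
        rw [if_pos hcx]
        simp only [show [c].length = 1 from rfl, List.drop_succ_cons, List.drop_zero]
        rw [ih t (acc + 1) ht]
        simp [hxc]
        omega
      · have hxc : (x == c) = false := by simp at hcx ⊢; intro e; exact hcx e.symm
        rw [if_neg hcx, ih t acc ht]
        simp [hxc]

-- Chars.count with a single-character needle is List.count.
theorem pv_chars_count_single (c : Char) (l : List Char) :
    PySem.Chars.count l [c] = l.count c := by
  simp [PySem.Chars.count, pv_count_go_single c l.length l 0 le_rfl]

-- A's first foldl builds the filtered index list.
theorem pv_blocks_foldl (l : List (Int × Char)) (acc : List Int) :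
    l.foldl (fun acc p => if p.2 == 'B' then acc ++ [p.1] else acc) acc
      = acc ++ (l.filter (fun p => p.2 == 'B')).map (·.1) := by
  induction l generalizing acc with
  | nil => simp
  | cons x t ih =>
    rw [List.foldl_cons, ih, List.filter_cons]
    by_cases hx : (x.2 == 'B') = true <;> simp [hx]

-- A's second foldl is a countP.
theorem pv_sum_foldl (lo hi : Int) (l : List Int) (a : Int) :
    l.foldl (fun acc i => acc + (if lo < i ∧ i < hi then (1 : Int) else 0)) a
      = a + (l.countP (fun i => decide (lo < i ∧ i < hi)) : Int) := by
  induction l generalizing a with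
  | nil => simp
  | cons x t ih =>
    by_cases hx : lo < x ∧ x < hi <;> simp [hx, ih] <;> ring

-- countP of an enumerate whose predicate reads only the element.
theorem pv_countP_enumerate_snd {α : Type} (q : α → Bool) :
    ∀ (xs : List α) (s : Int),
    (PySem.List.enumerate xs s).countP (fun p => q p.2) = xs.countP q := by
  intro xs
  induction xs with
  | nil => intro s; simp [PySem.List.enumerate_nil]
  | cons x t ih => intro s; simp [PySem.List.enumerate_cons, List.countP_cons, ih]

-- The window count: enumerated indices in [a, b) carrying 'B' = count of 'B' in the slice.
theorem pv_count_window (cs : List Char) (a b : Nat) :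
    (PySem.List.enumerate cs 0).countP
        (fun p => decide ((a : Int) ≤ p.1 ∧ p.1 < (b : Int)) && (p.2 == 'B'))
      = ((cs.drop a).take (b - a)).count 'B' := by
  have hcs : cs = cs.take a ++ ((cs.drop a).take (b - a) ++ (cs.drop a).drop (b - a)) := by
    simp
  set u := cs.take a with hu
  set v := (cs.drop a).take (b - a) with hv
  set w := (cs.drop a).drop (b - a) with hw
  have hul : u.length = min a cs.length := by rw [hu]; simp
  have hvl : v.length = min (b - a) (cs.length - a) := by rw [hv]; simp
  have hwl : w.length = cs.length - a - (b - a) := by rw [hw]; simp; omega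
  conv_lhs => rw [hcs]
  rw [PySem.List.enumerate_append, PySem.List.enumerate_append,
      List.countP_append, List.countP_append]
  have h1 : (PySem.List.enumerate u 0).countP
      (fun p => decide ((a : Int) ≤ p.1 ∧ p.1 < (b : Int)) && (p.2 == 'B')) = 0 := by
    rw [List.countP_eq_zero]
    intro p hp
    rw [PySem.List.mem_enumerate_iff] at hp
    obtain ⟨k, hk, rfl⟩ := hp
    rw [hul] at hk
    simp only [Bool.and_eq_true, decide_eq_true_eq, not_and]
    intro hle
    exfalso
    omega
  have h3 : (PySem.List.enumerate w (0 + (u.length : Int) + (v.length : Int))).countP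
      (fun p => decide ((a : Int) ≤ p.1 ∧ p.1 < (b : Int)) && (p.2 == 'B')) = 0 := by
    rw [List.countP_eq_zero]
    intro p hp
    rw [PySem.List.mem_enumerate_iff] at hp
    obtain ⟨k, hk, rfl⟩ := hp
    rw [hwl] at hk
    rw [hul, hvl]
    simp only [Bool.and_eq_true, decide_eq_true_eq, not_and]
    intro hle
    exfalso
    omega
  have h2 : (PySem.List.enumerate v (0 + (u.length : Int))).countP
      (fun p => decide ((a : Int) ≤ p.1 ∧ p.1 < (b : Int)) && (p.2 == 'B'))
      = v.count 'B' := by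
    have hc : ∀ q ∈ PySem.List.enumerate v (0 + (u.length : Int)),
        (decide ((a : Int) ≤ q.1 ∧ q.1 < (b : Int)) && (q.2 == 'B')) = true
          ↔ ((fun p => p.2 == 'B') q) = true := by
      intro q hq
      rw [PySem.List.mem_enumerate_iff] at hq
      obtain ⟨k, hk, rfl⟩ := hq
      rw [hvl] at hk
      simp only [Bool.and_eq_true, decide_eq_true_eq]
      refine ⟨fun hx => hx.2, fun hx => ⟨?_, hx⟩⟩
      rw [hul]
      push_cast
      omega
    rw [List.countP_congr hc,
        pv_countP_enumerate_snd (fun x => x == 'B') v (0 + (u.length : Int))]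
    rfl
  rw [h1, h2, h3]
  omega

-- ===== VERDICT (by name: the statement is the Claim_ definition above) =====
theorem get_blocks_between_house_and_pond_spec : Claim_equal_get_blocks_between_house_and_pond := by
  intro layout _
  unfold Spec_get_blocks_between_house_and_pond get_blocks_between_house_and_pond
    get_blocks_between_house_and_pond_alt
  simp only [PySem.Str.find_eq, PySem.Str.count_eq, PySem.Str.toList_slice,
    PySem.Chars.slice_eq_listSlice, show ("H".toList = ['H']) from rfl,
    show ("P".toList = ['P']) from rfl, show ("B".toList = ['B']) from rfl]
  set cs := layout.toList with hcs
  set h := PySem.Chars.find cs ['H'] with hh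
  set p := PySem.Chars.find cs ['P'] with hp
  have hh1 : -1 ≤ h := PySem.Chars.neg_one_le_find cs ['H']
  have hp1 : -1 ≤ p := PySem.Chars.neg_one_le_find cs ['P']
  rw [pv_blocks_foldl, pv_sum_foldl, List.nil_append, List.countP_map, List.countP_filter]
  rw [pv_chars_count_single]
  rw [PySem.List.slice_toNat cs (by omega) (le_max_right _ _)]
  rw [← pv_count_window cs (min h p + 1).toNat (max (max h p) 0).toNat]
  have hc : ∀ q ∈ PySem.List.enumerate cs 0,
      (((fun i => decide (min h p < i ∧ i < max h p)) ∘ (fun x => x.1)) q && (q.2 == 'B')) = true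
        ↔ (decide ((((min h p + 1).toNat : Nat) : Int) ≤ q.1 ∧
              q.1 < (((max (max h p) 0).toNat : Nat) : Int)) && (q.2 == 'B')) = true := by
    intro q hq
    rw [PySem.List.mem_enumerate_iff] at hq
    obtain ⟨k, hk, rfl⟩ := hq
    simp only [Function.comp, Bool.and_eq_true, decide_eq_true_eq]
    constructor
    · rintro ⟨h1, h2⟩
      exact ⟨by omega, h2⟩
    · rintro ⟨h1, h2⟩
      exact ⟨by omega, h2⟩
  rw [List.countP_congr hc]
  omega
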